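-- pv_equiv track=rewrite | github.com/michelerocchetti86-oss/aa-pipeline | aa_structural_reading_v5.py | _dominant_body
-- ===== SOURCE A (Python) =====
-- from typing import Dict, List, Tuple, Any, Set
--
-- WEIGHTS: Dict[str, int] = {
--     "Saturn": 3,
--     "Pluto": 4,
--     "Neptune": 2,
--     "Uranus": 2,
--     "Jupiter": 2,
--     "Mars": 1,
--     "Venus": 1,
--     "Sun": 1,
--     "Moon": 1,
--     "North Node": 1,
--     "Lilith": 1,
--     "Chiron": 1,
-- }
--
-- TIE_ORDER: List[str] = [
--     "Saturn","Pluto","Neptune","Uranus","Jupiter","Mars","Venus","Sun","Moon","North Node","Lilith","Chiron"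
-- ]
--
-- def _dominant_body(members_norm: List[str]) -> str | None:
--     best = None
--     best_w = -1
--     for pl in TIE_ORDER:
--         if pl in members_norm:
--             w = WEIGHTS.get(pl, 0)
--             if w > best_w:
--                 best = pl
--                 best_w = w
--     return best
-- ===== SOURCE B (Python) =====
-- WEIGHTS = {
--     "Saturn": 3,
--     "Pluto": 4,
--     "Neptune": 2,
--     "Uranus": 2,
--     "Jupiter": 2,
--     "Mars": 1,
--     "Venus": 1,
--     "Sun": 1,
--     "Moon": 1,
--     "North Node": 1,
--     "Lilith": 1,
--     "Chiron": 1,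
-- }
--
-- TIE_ORDER = [
--     "Saturn","Pluto","Neptune","Uranus","Jupiter","Mars","Venus","Sun","Moon","North Node","Lilith","Chiron"
-- ]
--
-- def _dominant_body(members_norm):
--     # Single pass over the input: keep the member with the best (weight, -tie_rank) key.
--     rank = {p: i for i, p in enumerate(TIE_ORDER)}
--     best = None
--     best_key = None
--     for p in members_norm:
--         if p in rank:
--             key = (WEIGHTS[p], -rank[p])
--             if best_key is None or key > best_key:
--                 best = p
--                 best_key = key
--     return best
-- ===== Notes on version B (the rewrite author's own statement) =====
-- stated objective: alternative
-- what changed: B inverts A's traversal: instead of scanning the constant TIE_ORDER table and testing each planet for membership in the input list, B precomputes a rank dict and walks the input once, keeping the member that maximizes the composite key (WEIGHTS[p], -rank[p]).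
import Mathlib
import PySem

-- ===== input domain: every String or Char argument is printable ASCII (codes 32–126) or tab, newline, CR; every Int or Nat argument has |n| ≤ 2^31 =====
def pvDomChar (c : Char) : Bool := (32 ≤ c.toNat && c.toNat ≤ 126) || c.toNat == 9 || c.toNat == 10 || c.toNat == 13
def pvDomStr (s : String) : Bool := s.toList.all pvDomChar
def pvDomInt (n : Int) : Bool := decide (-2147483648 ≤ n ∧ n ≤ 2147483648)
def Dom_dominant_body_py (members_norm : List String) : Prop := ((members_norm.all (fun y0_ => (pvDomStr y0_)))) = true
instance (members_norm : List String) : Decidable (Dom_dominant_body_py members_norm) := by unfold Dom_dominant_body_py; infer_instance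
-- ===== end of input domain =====

-- B walks the input once keeping an explicit best (weight, -rank) key instead of A's scan of the
-- constant TIE_ORDER table with a membership test per planet (objective: alternative decomposition).

-- ===== PORT A =====
def pvWEIGHTS : PySem.Dict String Int :=
  PySem.Dict.ofList [("Saturn",3),("Pluto",4),("Neptune",2),("Uranus",2),("Jupiter",2),("Mars",1),
                     ("Venus",1),("Sun",1),("Moon",1),("North Node",1),("Lilith",1),("Chiron",1)]

def pvTIE_ORDER : List String :=
  ["Saturn","Pluto","Neptune","Uranus","Jupiter","Mars","Venus","Sun","Moon","North Node","Lilith","Chiron"]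

def dominant_body_py (members_norm : List String) : Option String :=
  (pvTIE_ORDER.foldl
    (fun (st : Option String × Int) pl =>
      if members_norm.contains pl then
        let w := PySem.Dict.getD pvWEIGHTS pl 0
        if w > st.2 then (some pl, w) else st
      else st)
    (none, -1)).1

-- ===== PORT B =====
-- rank = {p: i for i, p in enumerate(TIE_ORDER)}
def pvRANK : PySem.Dict String Int :=
  (PySem.List.enumerate pvTIE_ORDER).foldl (fun d ip => d.insert ip.2 ip.1) PySem.Dict.empty

-- the loop body of B; WEIGHTS[p] is ported as getD _ 0: it is only reached when p ∈ rank, and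
-- every rank key is a WEIGHTS key, so Python's KeyError is unreachable and the default unused
def pvStepB (st : Option String × Option (Int × Int)) (p : String) : Option String × Option (Int × Int) :=
  match PySem.Dict.get? pvRANK p with
  | none => st
  | some r =>
    let key : Int × Int := (PySem.Dict.getD pvWEIGHTS p 0, -r)
    match st.2 with
    | none => (some p, some key)
    | some bk =>
      if key.1 > bk.1 ∨ (key.1 = bk.1 ∧ key.2 > bk.2) then (some p, some key) else st

def dominant_body_py_alt (members_norm : List String) : Option String :=
  (members_norm.foldl pvStepB (none, none)).1

-- ===== PRECONDITION & SPEC =====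
def Spec_dominant_body_py (members_norm : List String) (out : Option String) : Prop := out = dominant_body_py_alt members_norm
instance (members_norm : List String) (out : Option String) : Decidable (Spec_dominant_body_py members_norm out) := by unfold Spec_dominant_body_py; infer_instance

-- ===== CLAIM (what is proved, stated in full; the proofs are below) =====
def Claim_equal_dominant_body_py : Prop := ∀ (members_norm : List String), Dom_dominant_body_py members_norm → Spec_dominant_body_py members_norm (dominant_body_py members_norm)

-- ===== LEMMAS AND PROOFS =====

-- the composite key B maintains, as a function of the planet alone
def pvKey (p : String) : Int × Int :=
  (PySem.Dict.getD pvWEIGHTS p 0, -(PySem.Dict.getD pvRANK p 0))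

-- one step of B's loop, on the best-planet component alone
def pvBetter (o : Option String) (p : String) : Option String :=
  match PySem.Dict.get? pvRANK p with
  | none => o
  | some _ =>
    match o with
    | none => some p
    | some b =>
      if (pvKey p).1 > (pvKey b).1 ∨ ((pvKey p).1 = (pvKey b).1 ∧ (pvKey p).2 > (pvKey b).2)
      then some p else o

-- the common normal form: the chosen planet as a function of the 12 membership booleans,
-- planets listed in strictly decreasing (weight, -rank) order
def pvF (cS cP cN cU cJ cMa cV cSu cMo cNN cL cC : Bool) : Option String :=
  if cP then some "Pluto" else if cS then some "Saturn" else if cN then some "Neptune"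
  else if cU then some "Uranus" else if cJ then some "Jupiter" else if cMa then some "Mars"
  else if cV then some "Venus" else if cSu then some "Sun" else if cMo then some "Moon"
  else if cNN then some "North Node" else if cL then some "Lilith" else if cC then some "Chiron"
  else none

-- weight of A's best-so-far (-1 when none), and the tie rank of a planet
def pvWOf (o : Option String) : Int :=
  match o with
  | none => -1
  | some b => PySem.Dict.getD pvWEIGHTS b 0

def pvRankOf (p : String) : Int := PySem.Dict.getD pvRANK p 0

-- one step of A's loop, on the best-planet component alone
def pvStepA (ms : List String) (o : Option String) (pl : String) : Option String :=
  if ms.contains pl then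
    (if PySem.Dict.getD pvWEIGHTS pl 0 > pvWOf o then some pl else o)
  else o

lemma pvBetter_cases (o : Option String) (p : String) :
    pvBetter o p = o ∨ (pvBetter o p = some p ∧ PySem.Dict.get? pvRANK p ≠ none) := by
  unfold pvBetter
  rcases h : PySem.Dict.get? pvRANK p with _ | r
  · left
    simp
  · rcases o with _ | b
    · right
      exact ⟨by simp, by simp⟩
    · by_cases hcond : ((pvKey p).1 > (pvKey b).1 ∨ ((pvKey p).1 = (pvKey b).1 ∧ (pvKey p).2 > (pvKey b).2))
      · right
        exact ⟨by simp [hcond], by simp⟩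
      · left
        simp [hcond]

lemma pvAfold (ms : List String) : ∀ (l : List String) (o : Option String),
    (l.foldl
      (fun (st : Option String × Int) pl =>
        if ms.contains pl then
          let w := PySem.Dict.getD pvWEIGHTS pl 0
          if w > st.2 then (some pl, w) else st
        else st)
      (o, pvWOf o)).1 = l.foldl (pvStepA ms) o := by
  intro l
  induction l with
  | nil => intro o; rfl
  | cons pl l ih =>
    intro o
    rw [List.foldl_cons, List.foldl_cons]
    have h0 : (if ms.contains pl then
        let w := PySem.Dict.getD pvWEIGHTS pl 0
        if w > (o, pvWOf o).2 then ((some pl : Option String), w) else (o, pvWOf o)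
      else (o, pvWOf o)) = (pvStepA ms o pl, pvWOf (pvStepA ms o pl)) := by
      have hsnd : ((o, pvWOf o) : Option String × Int).2 = pvWOf o := rfl
      rw [hsnd]
      unfold pvStepA
      by_cases hm : pl ∈ ms
      · simp only [List.contains_iff_mem, hm, if_true]
        split_ifs with hcond
        · rfl
        · rfl
      · simp [hm]
    rw [h0, ih]

-- on a list of ranked planets walked in strictly increasing tie rank, with a best-so-far that
-- ranks before everything still to come, A's step agrees with B's step
set_option maxHeartbeats 4000000 in
lemma pvA_to_better (ms : List String) : ∀ (l : List String) (o : Option String),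
    (∀ pl ∈ l, PySem.Dict.get? pvRANK pl ≠ none ∧ 0 < PySem.Dict.getD pvWEIGHTS pl 0) →
    l.Pairwise (fun a b => pvRankOf a < pvRankOf b) →
    (∀ b, o = some b → ∀ pl ∈ l, pvRankOf b < pvRankOf pl) →
    l.foldl (pvStepA ms) o = l.foldl (fun o pl => if ms.contains pl then pvBetter o pl else o) o := by
  intro l
  induction l with
  | nil => intro o _ _ _; rfl
  | cons pl l ih =>
    intro o hpl hpw hinv
    obtain ⟨hrk, hw⟩ := hpl pl (List.mem_cons_self ..)
    rw [List.foldl_cons, List.foldl_cons]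
    by_cases hc : ms.contains pl = true
    · have hm : pl ∈ ms := by simpa using hc
      have hstep : pvStepA ms o pl = pvBetter o pl := by
        rcases hr : PySem.Dict.get? pvRANK pl with _ | r
        · exact absurd hr hrk
        · unfold pvStepA pvBetter
          simp only [hr]
          rcases o with _ | b
          · have hg1 : PySem.Dict.getD pvWEIGHTS pl 0 > pvWOf none := by
              simp only [pvWOf]; omega
            simp only [List.contains_iff_mem, hm, if_true, if_pos hg1]
          · have hrb : pvRankOf b < pvRankOf pl := hinv b rfl pl (List.mem_cons_self ..)
            have hiff : ((pvKey pl).1 > (pvKey b).1 ∨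
                ((pvKey pl).1 = (pvKey b).1 ∧ (pvKey pl).2 > (pvKey b).2))
                ↔ (PySem.Dict.getD pvWEIGHTS pl 0 > pvWOf (some b)) := by
              show ((PySem.Dict.getD pvWEIGHTS pl 0 > PySem.Dict.getD pvWEIGHTS b 0) ∨
                  (PySem.Dict.getD pvWEIGHTS pl 0 = PySem.Dict.getD pvWEIGHTS b 0 ∧
                    -(PySem.Dict.getD pvRANK pl 0) > -(PySem.Dict.getD pvRANK b 0)))
                ↔ PySem.Dict.getD pvWEIGHTS pl 0 > PySem.Dict.getD pvWEIGHTS b 0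
              unfold pvRankOf at hrb
              constructor
              · rintro (h | ⟨h1, h2⟩)
                · exact h
                · exfalso; omega
              · exact fun h => Or.inl h
            simp only [List.contains_iff_mem, hm, if_true]
            rw [if_congr hiff.symm rfl rfl]
      rw [hstep, if_pos hc]
      apply ih (pvBetter o pl)
      · exact fun q hq => hpl q (List.mem_cons_of_mem _ hq)
      · exact hpw.of_cons
      · intro b hb q hq
        rcases pvBetter_cases o pl with h | ⟨h, _⟩
        · exact hinv b (h.symm.trans hb) q (List.mem_cons_of_mem _ hq)
        · obtain rfl : pl = b := Option.some_inj.mp (h.symm.trans hb)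
          exact List.rel_of_pairwise_cons hpw hq
    · have hm : pl ∉ ms := by simpa using hc
      have hstep : pvStepA ms o pl = o := by simp [pvStepA, hm]
      rw [hstep, if_neg hc]
      exact ih o (fun q hq => hpl q (List.mem_cons_of_mem _ hq)) hpw.of_cons
        (fun b hb q hq => hinv b hb q (List.mem_cons_of_mem _ hq))

lemma pvContains_filter (f : String → Bool) (q : String) (hq : q ∈ pvTIE_ORDER) :
    (pvTIE_ORDER.filter f).contains q = f q := by
  rcases hfq : f q with _ | _
  · simp [List.mem_filter, hfq]
  · simp [List.mem_filter, hfq, hq]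

lemma pvRank_some_mem (x : String) (h : PySem.Dict.get? pvRANK x ≠ none) : x ∈ pvTIE_ORDER := by
  have hk : PySem.Dict.keys pvRANK = pvTIE_ORDER := by decide
  by_contra hmem
  exact h ((PySem.Dict.get?_eq_none_iff_not_mem_keys _ _).2 (by rw [hk]; exact hmem))

lemma pvRank_none_beq (x p : String) (h : PySem.Dict.get? pvRANK x = none)
    (hp : p ∈ pvTIE_ORDER) : (p == x) = false := by
  rcases eq_or_ne p x with h' | h'
  · subst h'
    have : PySem.Dict.get? pvRANK p ≠ none := by fin_cases hp <;> decide
    exact absurd h this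
  · simp [h']

set_option maxHeartbeats 12000000 in
lemma pvStep (x : String) (cS cP cN cU cJ cMa cV cSu cMo cNN cL cC : Bool) :
    pvF (cS || ("Saturn" == x)) (cP || ("Pluto" == x)) (cN || ("Neptune" == x))
        (cU || ("Uranus" == x)) (cJ || ("Jupiter" == x)) (cMa || ("Mars" == x))
        (cV || ("Venus" == x)) (cSu || ("Sun" == x)) (cMo || ("Moon" == x))
        (cNN || ("North Node" == x)) (cL || ("Lilith" == x)) (cC || ("Chiron" == x))
      = pvBetter (pvF cS cP cN cU cJ cMa cV cSu cMo cNN cL cC) x := by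
  rcases h : PySem.Dict.get? pvRANK x with _ | r
  · rw [pvRank_none_beq x "Saturn" h (by decide), pvRank_none_beq x "Pluto" h (by decide),
        pvRank_none_beq x "Neptune" h (by decide), pvRank_none_beq x "Uranus" h (by decide),
        pvRank_none_beq x "Jupiter" h (by decide), pvRank_none_beq x "Mars" h (by decide),
        pvRank_none_beq x "Venus" h (by decide), pvRank_none_beq x "Sun" h (by decide),
        pvRank_none_beq x "Moon" h (by decide), pvRank_none_beq x "North Node" h (by decide),
        pvRank_none_beq x "Lilith" h (by decide), pvRank_none_beq x "Chiron" h (by decide)]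
    simp [pvBetter, h]
  · have hx : x ∈ pvTIE_ORDER := pvRank_some_mem x (by simp [h])
    clear h
    fin_cases hx <;> (revert cS cP cN cU cJ cMa cV cSu cMo cNN cL cC; decide)

lemma pvB_better (xs : List String) :
    xs.foldl pvBetter none =
      pvF (xs.contains "Saturn") (xs.contains "Pluto") (xs.contains "Neptune")
          (xs.contains "Uranus") (xs.contains "Jupiter") (xs.contains "Mars")
          (xs.contains "Venus") (xs.contains "Sun") (xs.contains "Moon")
          (xs.contains "North Node") (xs.contains "Lilith") (xs.contains "Chiron") := by
  induction xs using List.reverseRecOn with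
  | nil => rfl
  | append_singleton xs x ih =>
    rw [List.foldl_append, List.foldl_cons, List.foldl_nil, ih]
    simp only [List.contains_append, List.contains_cons, List.contains_nil, Bool.or_false]
    exact (pvStep x _ _ _ _ _ _ _ _ _ _ _ _).symm

-- a best-so-far value of B's loop is always a planet with a rank
def pvGood (o : Option String) : Prop := ∀ b, o = some b → PySem.Dict.get? pvRANK b ≠ none

lemma pvBetter_good (o : Option String) (p : String) (hg : pvGood o) : pvGood (pvBetter o p) := by
  intro b' hb'
  rcases pvBetter_cases o p with h | ⟨h, hrk⟩
  · rw [h] at hb'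
    exact hg b' hb'
  · rw [h] at hb'
    injection hb' with e
    subst e
    exact hrk

lemma pvStepB_better (o : Option String) (p : String) (hg : pvGood o) :
    pvStepB (o, o.map pvKey) p = (pvBetter o p, (pvBetter o p).map pvKey) := by
  rcases h : PySem.Dict.get? pvRANK p with _ | r
  · simp [pvStepB, pvBetter, h]
  · have hr : PySem.Dict.getD pvRANK p 0 = r := by
      rw [PySem.Dict.getD_eq_get?_getD, h]; rfl
    rcases o with _ | b
    · simp [pvStepB, pvBetter, h, pvKey, hr]
    · simp only [pvStepB, pvBetter, h, pvKey, hr, Option.map_some]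
      split_ifs <;> simp [pvKey, hr]

lemma pvBfold (xs : List String) (o : Option String) (hg : pvGood o) :
    (xs.foldl pvStepB (o, o.map pvKey)).1 = xs.foldl pvBetter o := by
  induction xs generalizing o with
  | nil => rfl
  | cons p xs ih =>
    rw [List.foldl_cons, List.foldl_cons, pvStepB_better o p hg]
    exact ih (pvBetter o p) (pvBetter_good o p hg)

-- ===== VERDICT (by name: the statement is the Claim_ definition above) =====
theorem dominant_body_py_spec : Claim_equal_dominant_body_py := by
  intro ms _
  show dominant_body_py ms = dominant_body_py_alt ms
  have hA1 : dominant_body_py ms = pvTIE_ORDER.foldl (pvStepA ms) none := by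
    unfold dominant_body_py
    exact pvAfold ms pvTIE_ORDER none
  have hA2 : pvTIE_ORDER.foldl (pvStepA ms) none
      = pvTIE_ORDER.foldl (fun o pl => if ms.contains pl then pvBetter o pl else o) none :=
    pvA_to_better ms pvTIE_ORDER none (by decide) (by decide) (fun b hb => by cases hb)
  have hB : dominant_body_py_alt ms = ms.foldl pvBetter none := by
    unfold dominant_body_py_alt
    exact pvBfold ms none (fun b hb => by cases hb)
  rw [hA1, hA2, ← List.foldl_filter, hB, pvB_better, pvB_better,
      pvContains_filter _ _ (by decide), pvContains_filter _ _ (by decide),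
      pvContains_filter _ _ (by decide), pvContains_filter _ _ (by decide),
      pvContains_filter _ _ (by decide), pvContains_filter _ _ (by decide),
      pvContains_filter _ _ (by decide), pvContains_filter _ _ (by decide),
      pvContains_filter _ _ (by decide), pvContains_filter _ _ (by decide),
      pvContains_filter _ _ (by decide), pvContains_filter _ _ (by decide)]
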